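-- pv_equiv track=rewrite | github.com/dahezhiquan/FindUpload | fu.py | kill_recursion
-- ===== SOURCE A (Python) =====
-- from collections import Counter
--
-- def kill_recursion(url):
--     url_parts = url.split("/")
--     counts = Counter(url_parts)
--     # 遍历计数结果，找到超过4个的元素
--     for element, count in counts.items():
--         if count >= 4:
--             return True
--     else:
--         return False
-- ===== SOURCE B (Python) =====
-- def kill_recursion(url):
--     segs = sorted(url.split("/"))
--     prev = None
--     run = 0
--     for s in segs:
--         if s == prev:
--             run += 1
--         else:
--             prev = s
--             run = 1
--         if run >= 4:
--             return True
--     return False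
-- ===== Notes on version B (the rewrite author's own statement) =====
-- stated objective: alternative
-- what changed: Replaces the Counter hash-count pass with sorting the segments and a single run-length scan over adjacent equal segments with early exit at a run of 4.
import Mathlib
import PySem

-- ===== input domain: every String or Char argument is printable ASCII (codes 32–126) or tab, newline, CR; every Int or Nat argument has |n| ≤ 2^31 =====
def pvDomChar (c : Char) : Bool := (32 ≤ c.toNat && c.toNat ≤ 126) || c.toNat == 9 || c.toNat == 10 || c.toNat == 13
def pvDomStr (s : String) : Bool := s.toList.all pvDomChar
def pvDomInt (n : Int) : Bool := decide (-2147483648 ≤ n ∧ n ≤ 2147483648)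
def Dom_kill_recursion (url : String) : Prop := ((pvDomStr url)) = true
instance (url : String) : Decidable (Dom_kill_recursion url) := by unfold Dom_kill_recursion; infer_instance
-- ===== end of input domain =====

-- B replaces A's Counter-based counting with sort + run-length scan over adjacent equal segments (alternative decomposition, similar cost).


-- ===== PORT A =====
-- 'for element, count in counts.items(): if count >= 4: return True' / 'else: return False'
def krItemsLoop : List (String × Int) → Bool
  | [] => false
  | (_, count) :: rest => if 4 ≤ count then true else krItemsLoop rest

def kill_recursion (url : String) : Bool :=
  let url_parts := (PySem.Str.split? url "/").getD []   -- sep is the non-empty literal "/", so split? is always 'some'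
  let counts := PySem.Dict.counter url_parts
  krItemsLoop counts.items

-- ===== PORT B =====
-- run-length scan over the sorted segments, early exit at a run of 4
def krRunLoop (prev : Option String) (run : Nat) : List String → Bool
  | [] => false
  | s :: rest =>
      let run' := if some s = prev then run + 1 else 1
      if 4 ≤ run' then true else krRunLoop (some s) run' rest

def kill_recursion_alt (url : String) : Bool :=
  let segs := PySem.List.sorted ((PySem.Str.split? url "/").getD []) (fun x => x)
  krRunLoop none 0 segs

-- ===== PRECONDITION & SPEC =====
def Spec_kill_recursion (url : String) (out : Bool) : Prop := out = kill_recursion_alt url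
instance (url : String) (out : Bool) : Decidable (Spec_kill_recursion url out) := by unfold Spec_kill_recursion; infer_instance

-- ===== CLAIM (what is proved, stated in full; the proofs are below) =====
def Claim_equal_kill_recursion : Prop := ∀ (url : String), Dom_kill_recursion url → Spec_kill_recursion url (kill_recursion url)

-- ===== LEMMAS AND PROOFS =====

-- A's items loop is an 'any' over the counter items
lemma krItemsLoop_eq_any (l : List (String × Int)) :
    krItemsLoop l = l.any (fun p => decide (4 ≤ p.2)) := by
  induction l with
  | nil => rfl
  | cons p rest ih =>
    obtain ⟨e, c⟩ := p
    simp [krItemsLoop, ih]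

-- A computes: some segment occurs at least 4 times
lemma kill_recursion_eq (url : String) :
    kill_recursion url
      = decide (∃ x ∈ (PySem.Str.split? url "/").getD [], 4 ≤ ((PySem.Str.split? url "/").getD []).count x) := by
  unfold kill_recursion
  rw [krItemsLoop_eq_any, PySem.Dict.items_counter, List.any_map]
  apply Bool.eq_iff_iff.mpr
  simp [List.any_eq_true, PySem.Set.mem_ofList, Function.comp]

-- B's run loop on a sorted tail, with a current run of p of length r (0 < r < 4)
lemma krRunLoop_some (ys : List String) :
    ∀ (p : String) (r : Nat), 0 < r → r < 4 →
    ys.Pairwise (· ≤ ·) → (∀ y ∈ ys, p ≤ y) →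
    (krRunLoop (some p) r ys = true ↔
      4 ≤ r + ys.count p ∨ ∃ x ∈ ys, x ≠ p ∧ 4 ≤ ys.count x) := by
  induction ys with
  | nil =>
    intro p r hr hr4 _ _
    simp [krRunLoop]
    omega
  | cons s rest ih =>
    intro p r hr hr4 hpw hall
    rw [List.pairwise_cons] at hpw
    obtain ⟨hsle, hpw'⟩ := hpw
    by_cases hsp : s = p
    · subst hsp
      simp only [krRunLoop, if_true]
      by_cases h4 : 4 ≤ r + 1
      · rw [if_pos h4]
        have hc : (s :: rest).count s = rest.count s + 1 := by simp
        constructor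
        · intro _; left; omega
        · intro _; rfl
      · rw [if_neg h4, ih s (r+1) (by omega) (by omega) hpw' hsle]
        have hc : (s :: rest).count s = rest.count s + 1 := by simp
        constructor
        · rintro (h | ⟨x, hx, hxs, hcx⟩)
          · left; omega
          · right
            exact ⟨x, List.mem_cons_of_mem s hx, hxs,
              by rwa [List.count_cons_of_ne (fun h => hxs h.symm)]⟩
        · rintro (h | ⟨x, hx, hxs, hcx⟩)
          · left; omega
          · right
            rcases List.mem_cons.mp hx with h | h
            · exact absurd h hxs
            · exact ⟨x, h, hxs, by rwa [List.count_cons_of_ne (fun h => hxs h.symm)] at hcx⟩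
    · have hps : p < s := lt_of_le_of_ne (hall s (List.mem_cons_self)) (fun h => hsp h.symm)
      have hne : ∀ y ∈ s :: rest, y ≠ p := by
        intro y hy
        rcases List.mem_cons.mp hy with h | h
        · subst h; exact fun h => hsp h
        · intro hyp; subst hyp; exact absurd (hsle _ h) (not_le.mpr hps)
      have hcp : (s :: rest).count p = 0 :=
        List.count_eq_zero.mpr (fun h => hne p h rfl)
      have hcond : ¬ (some s = some p) := by simpa using hsp
      simp only [krRunLoop, if_neg hcond]
      rw [if_neg (by omega : ¬ 4 ≤ 1), ih s 1 (by omega) (by omega) hpw' hsle]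
      have hcs : (s :: rest).count s = rest.count s + 1 := by simp
      constructor
      · rintro (h | ⟨x, hx, hxs, hcx⟩)
        · right
          exact ⟨s, List.mem_cons_self, hne s List.mem_cons_self, by omega⟩
        · right
          exact ⟨x, List.mem_cons_of_mem s hx, hne x (List.mem_cons_of_mem s hx),
            by rwa [List.count_cons_of_ne (fun h => hxs h.symm)]⟩
      · rintro (h | ⟨x, hx, hxp, hcx⟩)
        · omega
        · rcases List.mem_cons.mp hx with h | h
          · subst h; left; omega
          · by_cases hxs : x = s
            · subst hxs; left; omega
            · right
              exact ⟨x, h, hxs, by rwa [List.count_cons_of_ne (fun h => hxs h.symm)] at hcx⟩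

lemma krRunLoop_none (ys : List String) (hs : ys.Pairwise (· ≤ ·)) :
    krRunLoop none 0 ys = true ↔ ∃ x ∈ ys, 4 ≤ ys.count x := by
  cases ys with
  | nil => simp [krRunLoop]
  | cons s rest =>
    rw [List.pairwise_cons] at hs
    obtain ⟨hsle, hpw'⟩ := hs
    have hcond : ¬ (some s = none) := by simp
    simp only [krRunLoop, if_neg hcond]
    rw [if_neg (by omega : ¬ 4 ≤ 1), krRunLoop_some rest s 1 (by omega) (by omega) hpw' hsle]
    have hcs : (s :: rest).count s = rest.count s + 1 := by simp
    constructor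
    · rintro (h | ⟨x, hx, hxs, hcx⟩)
      · exact ⟨s, List.mem_cons_self, by omega⟩
      · exact ⟨x, List.mem_cons_of_mem s hx,
          by rwa [List.count_cons_of_ne (fun h => hxs h.symm)]⟩
    · rintro ⟨x, hx, hcx⟩
      rcases List.mem_cons.mp hx with h | h
      · subst h; left; omega
      · by_cases hxs : x = s
        · subst hxs; left; omega
        · right
          exact ⟨x, h, hxs, by rwa [List.count_cons_of_ne (fun h => hxs h.symm)] at hcx⟩

lemma kill_recursion_alt_eq (url : String) :
    kill_recursion_alt url
      = decide (∃ x ∈ (PySem.Str.split? url "/").getD [], 4 ≤ ((PySem.Str.split? url "/").getD []).count x) := by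
  unfold kill_recursion_alt
  set parts := (PySem.Str.split? url "/").getD [] with hparts
  apply Bool.eq_iff_iff.mpr
  rw [krRunLoop_none _ (PySem.List.sorted_pairwise parts (fun x => x))]
  have hperm := PySem.List.sorted_perm parts (fun x => x) false
  simp only [decide_eq_true_eq]
  constructor
  · rintro ⟨x, hx, hcx⟩
    exact ⟨x, hperm.mem_iff.mp hx, by rwa [hperm.count_eq] at hcx⟩
  · rintro ⟨x, hx, hcx⟩
    exact ⟨x, hperm.mem_iff.mpr hx, by rwa [hperm.count_eq]⟩

-- ===== VERDICT (by name: the statement is the Claim_ definition above) =====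
theorem kill_recursion_spec : Claim_equal_kill_recursion := by
  intro url _
  unfold Spec_kill_recursion
  rw [kill_recursion_eq, kill_recursion_alt_eq]
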